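-- pv_equiv track=rewrite | github.com/xDuinoRails/xDuinoRails_Ares-M | pio_selectrix.py | _t1bits_to_polarity_symbols
-- ===== SOURCE A (Python) =====
-- def _t1bits_to_polarity_symbols(t1_bits, start_polarity=1):
--     """
--     Aus T1-Bitfolge (0=gleiche Pol.; 1=wechselnde Pol.) absolute Polarität erzeugen.
--     Rückgabe: Liste 2-Bit-Symbole pro Datenbit für (IN2..IN1):
--       +V  => '01'  (IN2=0, IN1=1)
--       -V  => '10'  (IN2=1, IN1=0)
--     """
--     pol = 1 if start_polarity else 0  # 1=+V, 0=-V
--     symbols = []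
--     for b in t1_bits:
--         if b & 1:  # '1' => toggeln
--             pol ^= 1
--         # Map auf (IN2..IN1):
--         symbols.append(0b01 if pol else 0b10)
--     return symbols
-- ===== SOURCE B (Python) =====
-- def _t1bits_to_polarity_symbols(t1_bits, start_polarity=1):
--     # Run-length construction: collect toggle positions once, then emit the
--     # output as constant runs between consecutive toggles.
--     toggles = [i for i, b in enumerate(t1_bits) if b & 1]
--     pol = 1 if start_polarity else 0
--     out = []
--     prev = 0
--     for i in toggles:
--         out += [0b01 if pol else 0b10] * (i - prev)
--         pol ^= 1
--         prev = i
--     out += [0b01 if pol else 0b10] * (len(t1_bits) - prev)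
--     return out
-- ===== Notes on version B (the rewrite author's own statement) =====
-- stated objective: alternative
-- what changed: Replaces A's per-bit toggle-and-append loop with a run-length construction: collect the toggle positions once via enumerate+filter, then emit the output as constant replicated runs between consecutive toggles.
import Mathlib
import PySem

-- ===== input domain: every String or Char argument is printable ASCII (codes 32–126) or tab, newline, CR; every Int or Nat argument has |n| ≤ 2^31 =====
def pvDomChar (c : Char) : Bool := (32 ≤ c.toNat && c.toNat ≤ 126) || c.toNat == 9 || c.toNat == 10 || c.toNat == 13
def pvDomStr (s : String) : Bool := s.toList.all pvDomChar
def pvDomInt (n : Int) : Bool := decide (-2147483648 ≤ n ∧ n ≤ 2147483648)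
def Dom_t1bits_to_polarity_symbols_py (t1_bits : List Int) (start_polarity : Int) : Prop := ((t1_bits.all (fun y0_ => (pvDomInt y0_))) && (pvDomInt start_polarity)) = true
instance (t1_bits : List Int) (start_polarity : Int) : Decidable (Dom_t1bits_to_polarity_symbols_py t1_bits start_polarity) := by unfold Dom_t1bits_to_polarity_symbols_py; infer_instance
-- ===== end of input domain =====

-- B replaces A's per-bit toggle-and-append loop by a run-length construction:
-- collect the toggle positions once, then emit the output as constant runs
-- between consecutive toggles (alternative decomposition, same asymptotic cost).

-- ===== PORT A =====
-- literal port of A's single loop: carry (pol, symbols), toggle pol on odd bits, append a symbol each step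
def t1bits_to_polarity_symbols_py (t1_bits : List Int) (start_polarity : Int) : List Int :=
  (t1_bits.foldl
    (fun (st : Int × List Int) b =>
      let pol := if PySem.Int.band b 1 ≠ 0 then PySem.Int.bxor st.1 1 else st.1
      (pol, st.2 ++ [if pol ≠ 0 then 1 else 2]))
    ((if start_polarity ≠ 0 then 1 else 0), ([] : List Int))).2

-- ===== PORT B =====
-- port of Source B: toggle positions via enumerate+filter, then a fold over the toggle
-- list carrying (pol, prev, out), emitting `[sym] * (i - prev)` runs, plus the final run
def t1bits_to_polarity_symbols_py_alt (t1_bits : List Int) (start_polarity : Int) : List Int :=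
  let toggles := ((PySem.List.enumerate t1_bits).filter
                    (fun p => PySem.Int.band p.2 1 != 0)).map (·.1)
  let st := toggles.foldl
    (fun (st : Int × Int × List Int) i =>
      (PySem.Int.bxor st.1 1, i,
        st.2.2 ++ PySem.List.pyRepeat [if st.1 ≠ 0 then 1 else 2] (i - st.2.1)))
    ((if start_polarity ≠ 0 then 1 else 0), (0 : Int), ([] : List Int))
  st.2.2 ++ PySem.List.pyRepeat [if st.1 ≠ 0 then 1 else 2] ((t1_bits.length : Int) - st.2.1)

-- ===== PRECONDITION & SPEC =====
def Spec_t1bits_to_polarity_symbols_py (t1_bits : List Int) (start_polarity : Int) (out : List Int) : Prop := out = t1bits_to_polarity_symbols_py_alt t1_bits start_polarity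
instance (t1_bits : List Int) (start_polarity : Int) (out : List Int) : Decidable (Spec_t1bits_to_polarity_symbols_py t1_bits start_polarity out) := by unfold Spec_t1bits_to_polarity_symbols_py; infer_instance

-- ===== CLAIM (what is proved, stated in full; the proofs are below) =====
def Claim_equal_t1bits_to_polarity_symbols_py : Prop := ∀ (t1_bits : List Int) (start_polarity : Int), Dom_t1bits_to_polarity_symbols_py t1_bits start_polarity → Spec_t1bits_to_polarity_symbols_py t1_bits start_polarity (t1bits_to_polarity_symbols_py t1_bits start_polarity)

-- ===== LEMMAS AND PROOFS =====

-- reference recursion both ports are reduced to: per bit, xor in the bit's LSB, emit the symbol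
def polyRec : List Int → Int → List Int
  | [], _ => []
  | b :: bs, pol =>
    let p := PySem.Int.bxor pol (PySem.Int.band b 1)
    (if p ≠ 0 then 1 else 2) :: polyRec bs p

-- Python's `b & 1` is 0 or 1
lemma band_one_cases (b : Int) : PySem.Int.band b 1 = 0 ∨ PySem.Int.band b 1 = 1 := by
  rw [PySem.Int.band_one]
  rcases Int.emod_two_eq_zero_or_one b with h | h
  · left; simpa [PySem.Int.mod, Int.fmod_eq_emod] using h
  · right; simpa [PySem.Int.mod, Int.fmod_eq_emod] using h

-- A's conditional toggle is xor with the masked bit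
lemma toggle_eq_bxor (b pol : Int) :
    (if PySem.Int.band b 1 ≠ 0 then PySem.Int.bxor pol 1 else pol)
      = PySem.Int.bxor pol (PySem.Int.band b 1) := by
  rcases band_one_cases b with h | h <;> simp [h]

-- A's fold equals the reference recursion
lemma A_eq_polyRec (bs : List Int) : ∀ (pol : Int) (acc : List Int),
    (bs.foldl
      (fun (st : Int × List Int) b =>
        let pol := if PySem.Int.band b 1 ≠ 0 then PySem.Int.bxor st.1 1 else st.1
        (pol, st.2 ++ [if pol ≠ 0 then 1 else 2]))
      (pol, acc)).2
    = acc ++ polyRec bs pol := by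
  induction bs with
  | nil => intro pol acc; simp [polyRec]
  | cons b bs ih =>
    intro pol acc
    simp only [List.foldl_cons, polyRec]
    rw [ih, toggle_eq_bxor]
    simp

-- abbreviation for B's fold step
def bStep (st : Int × Int × List Int) (i : Int) : Int × Int × List Int :=
  (PySem.Int.bxor st.1 1, i,
    st.2.2 ++ PySem.List.pyRepeat [if st.1 ≠ 0 then 1 else 2] (i - st.2.1))

-- B's result from a given fold state
def bFinish (st : Int × Int × List Int) (n : Int) : List Int :=
  st.2.2 ++ PySem.List.pyRepeat [if st.1 ≠ 0 then 1 else 2] (n - st.2.1)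

-- moving `prev` one step right while prepending one symbol of the current run leaves the result unchanged
lemma shift_lemma (ts : List Int) (pol prev : Int) (acc : List Int) (n : Int)
    (hts : ∀ i ∈ ts, prev + 1 ≤ i) (hn : prev + 1 ≤ n) :
    bFinish (ts.foldl bStep (pol, prev, acc)) n
      = bFinish (ts.foldl bStep (pol, prev + 1, acc ++ [if pol ≠ 0 then 1 else 2])) n := by
  have hrep : ∀ m : Int, prev + 1 ≤ m →
      (acc ++ PySem.List.pyRepeat [if pol ≠ 0 then 1 else 2] (m - prev))
        = (acc ++ [if pol ≠ 0 then 1 else 2])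
            ++ PySem.List.pyRepeat [if pol ≠ 0 then 1 else 2] (m - (prev + 1)) := by
    intro m hm
    rw [PySem.List.pyRepeat_singleton, PySem.List.pyRepeat_singleton]
    have : (m - prev).toNat = (m - (prev + 1)).toNat + 1 := by omega
    rw [this]
    simp [List.replicate_succ]
  cases ts with
  | nil =>
    simp only [List.foldl_nil, bFinish]
    exact hrep n hn
  | cons i ts =>
    have hi : prev + 1 ≤ i := hts i (by simp)
    simp only [List.foldl_cons, bStep]
    rw [hrep i hi]

-- every toggle index of `enumerate bs k` is ≥ k
lemma toggles_ge (bs : List Int) (k : Int) :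
    ∀ i ∈ ((PySem.List.enumerate bs k).filter
              (fun p => PySem.Int.band p.2 1 != 0)).map (·.1), k ≤ i := by
  intro i hi
  rcases List.mem_map.mp hi with ⟨p, hp, rfl⟩
  have hp' := List.mem_of_mem_filter hp
  rcases (PySem.List.mem_enumerate_iff bs k p).mp hp' with ⟨j, hj, rfl⟩
  simp

-- central invariant: B's run-length build over the toggles of `enumerate bs k`,
-- started at prev = k, produces the reference recursion's output
lemma B_core (bs : List Int) : ∀ (pol k : Int) (acc : List Int),
    bFinish ((((PySem.List.enumerate bs k).filter
                  (fun p => PySem.Int.band p.2 1 != 0)).map (·.1)).foldl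
              bStep (pol, k, acc)) (k + bs.length)
      = acc ++ polyRec bs pol := by
  induction bs with
  | nil => intro pol k acc; simp [bFinish, polyRec, PySem.List.pyRepeat_singleton]
  | cons b bs ih =>
    intro pol k acc
    have hge := toggles_ge bs (k + 1)
    have hn : k + 1 ≤ k + ((b :: bs).length : Int) := by
      simp only [List.length_cons]; push_cast; omega
    have harith : k + (((b :: bs).length : Int)) = (k + 1) + (bs.length : Int) := by
      simp only [List.length_cons]; push_cast; ring
    rcases band_one_cases b with h | h
    · -- even bit: head is not a toggle; shift prev and use the IH at k+1
      rw [PySem.List.enumerate_cons, List.filter_cons_of_neg (by simp [h]), harith,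
        shift_lemma _ pol k acc _ hge (by omega),
        ih pol (k + 1) (acc ++ [if pol ≠ 0 then 1 else 2])]
      simp [polyRec, h]
    · -- odd bit: head is a toggle; one bStep emitting an empty run, then shift and the IH
      rw [PySem.List.enumerate_cons, List.filter_cons_of_pos (by simp [h]),
        List.map_cons, List.foldl_cons]
      simp only [bStep, sub_self]
      have hrep0 : PySem.List.pyRepeat ([if pol ≠ 0 then (1:Int) else 2]) (0:Int) = [] := by
        rw [PySem.List.pyRepeat_singleton]; simp
      rw [hrep0, List.append_nil, harith,
        shift_lemma _ (PySem.Int.bxor pol 1) k acc _ hge (by omega),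
        ih (PySem.Int.bxor pol 1) (k + 1) (acc ++ [if PySem.Int.bxor pol 1 ≠ 0 then 1 else 2])]
      simp [polyRec, h]

-- ===== VERDICT (by name: the statement is the Claim_ definition above) =====
theorem t1bits_to_polarity_symbols_py_spec : Claim_equal_t1bits_to_polarity_symbols_py := by
  intro t1_bits start_polarity _
  show _ = _
  unfold t1bits_to_polarity_symbols_py t1bits_to_polarity_symbols_py_alt
  have hB := B_core t1_bits (if start_polarity ≠ 0 then 1 else 0) 0 []
  simp only [zero_add] at hB
  rw [A_eq_polyRec]
  simp only [List.nil_append] at hB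
  exact hB.symm
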